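-- pv_equiv track=rewrite | github.com/VaC1av-111/pg | cviceni10_1.py | filtruj_cisla
-- ===== SOURCE A (Python) =====
-- def filtruj_cisla(typ, cisla):
--     if typ == "kladna":
--         vysledek = [x for x in cisla if x > 0]
--     elif typ == "zaporna":
--         vysledek = [x for x in cisla if x < 0]
--     elif typ == "suda":
--         vysledek = [x for x in cisla if x % 2 == 0]
--     elif typ == "licha":
--         vysledek = [x for x in cisla if x % 2 != 0]
--     else:
--         vysledek = []
--     # Vaše řešení zde
--
--     return vysledek
-- ===== SOURCE B (Python) =====
-- def filtruj_cisla(typ, cisla):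
--     # One pass partitions the input into all four categories at once;
--     # the answer is then just a lookup of the requested bucket.
--     kladna, zaporna, suda, licha = [], [], [], []
--     for x in cisla:
--         if x > 0:
--             kladna.append(x)
--         if x < 0:
--             zaporna.append(x)
--         if x % 2 == 0:
--             suda.append(x)
--         else:
--             licha.append(x)
--     buckets = {"kladna": kladna, "zaporna": zaporna, "suda": suda, "licha": licha}
--     return buckets.get(typ, [])
-- ===== Notes on version B (the rewrite author's own statement) =====
-- stated objective: alternative
-- what changed: Instead of choosing one predicate and filtering, B partitions the list in a single pass into all four category buckets (positive, negative, even, odd) and then returns the bucket named by typ (or [] for an unknown typ).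
import Mathlib
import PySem

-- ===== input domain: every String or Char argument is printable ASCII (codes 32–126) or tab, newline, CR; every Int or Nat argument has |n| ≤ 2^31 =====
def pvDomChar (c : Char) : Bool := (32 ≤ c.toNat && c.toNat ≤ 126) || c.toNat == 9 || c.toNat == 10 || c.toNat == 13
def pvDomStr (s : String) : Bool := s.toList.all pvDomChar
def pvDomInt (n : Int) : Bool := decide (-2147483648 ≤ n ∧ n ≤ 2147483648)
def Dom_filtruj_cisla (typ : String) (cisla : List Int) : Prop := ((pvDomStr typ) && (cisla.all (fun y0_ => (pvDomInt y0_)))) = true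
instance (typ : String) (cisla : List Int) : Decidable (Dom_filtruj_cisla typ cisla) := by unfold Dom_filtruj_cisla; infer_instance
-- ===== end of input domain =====

-- B partitions the list once into all four category buckets and returns the requested one (alternative decomposition; same cost).

-- ===== PORT A =====
def filtruj_cisla (typ : String) (cisla : List Int) : List Int :=
  if typ == "kladna" then cisla.filter (fun x => decide (x > 0))
  else if typ == "zaporna" then cisla.filter (fun x => decide (x < 0))
  else if typ == "suda" then cisla.filter (fun x => PySem.Int.mod x 2 == 0)
  else if typ == "licha" then cisla.filter (fun x => !(PySem.Int.mod x 2 == 0))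
  else []

-- ===== PORT B =====
-- one pass builds the four buckets simultaneously (transcribes Source B's loop with its four appends)
def fcAltStep (st : List Int × List Int × List Int × List Int) (x : Int) :
    List Int × List Int × List Int × List Int :=
  let (k, z, s, l) := st
  let k := if x > 0 then k ++ [x] else k
  let z := if x < 0 then z ++ [x] else z
  if PySem.Int.mod x 2 == 0 then (k, z, s ++ [x], l) else (k, z, s, l ++ [x])

def filtruj_cisla_alt (typ : String) (cisla : List Int) : List Int :=
  let (k, z, s, l) := cisla.foldl fcAltStep ([], [], [], [])
  let buckets : PySem.Dict String (List Int) :=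
    PySem.Dict.ofList [("kladna", k), ("zaporna", z), ("suda", s), ("licha", l)]
  buckets.getD typ []

-- ===== PRECONDITION & SPEC =====
def Spec_filtruj_cisla (typ : String) (cisla : List Int) (out : List Int) : Prop := out = filtruj_cisla_alt typ cisla
instance (typ : String) (cisla : List Int) (out : List Int) : Decidable (Spec_filtruj_cisla typ cisla out) := by unfold Spec_filtruj_cisla; infer_instance

-- ===== CLAIM (what is proved, stated in full; the proofs are below) =====
def Claim_equal_filtruj_cisla : Prop := ∀ (typ : String) (cisla : List Int), Dom_filtruj_cisla typ cisla → Spec_filtruj_cisla typ cisla (filtruj_cisla typ cisla)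

-- ===== LEMMAS AND PROOFS =====
theorem fcAlt_foldl (cisla : List Int) (k z s l : List Int) :
    cisla.foldl fcAltStep (k, z, s, l) =
      (k ++ cisla.filter (fun x => decide (x > 0)),
       z ++ cisla.filter (fun x => decide (x < 0)),
       s ++ cisla.filter (fun x => PySem.Int.mod x 2 == 0),
       l ++ cisla.filter (fun x => !(PySem.Int.mod x 2 == 0))) := by
  induction cisla generalizing k z s l with
  | nil => simp
  | cons x xs ih =>
    simp only [List.foldl_cons, List.filter_cons, fcAltStep]
    by_cases h1 : x > 0 <;> by_cases h2 : x < 0 <;>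
      by_cases h3 : (PySem.Int.mod x 2 == 0) = true <;>
      simp only [h1, h2, h3, if_pos, if_neg, decide_true, decide_false,
        Bool.not_true, Bool.not_false, decide_eq_true_eq, if_true, if_false,
        Bool.false_eq_true, not_false_eq_true, ih,
        List.append_assoc, List.singleton_append] <;>
      simp_all [ih]

-- ===== VERDICT (by name: the statement is the Claim_ definition above) =====
theorem filtruj_cisla_spec : Claim_equal_filtruj_cisla := by
  intro typ cisla _
  unfold Spec_filtruj_cisla filtruj_cisla filtruj_cisla_alt
  rw [fcAlt_foldl]
  by_cases h1 : typ = "kladna" <;> by_cases h2 : typ = "zaporna" <;>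
    by_cases h3 : typ = "suda" <;> by_cases h4 : typ = "licha" <;>
    simp_all [PySem.Dict.ofList, PySem.Dict.update, PySem.Dict.insert,
      PySem.Dict.empty, PySem.Dict.getD, PySem.Dict.get?, PySem.Dict.contains, List.foldl] <;>
    simp [List.find?, beq_eq_false_iff_ne.mpr (Ne.symm h1), beq_eq_false_iff_ne.mpr (Ne.symm h2),
      beq_eq_false_iff_ne.mpr (Ne.symm h3), beq_eq_false_iff_ne.mpr (Ne.symm h4)]
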